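-- pv_equiv track=rewrite | github.com/kildegaard/fcen | python-UNSAM-2020/semana_4/propaga_v2.py | propagar_a_derecha
-- ===== SOURCE A (Python) =====
-- def propagar_a_derecha(m):
--     l = m.copy()
--     n = len(l)
--     for i, e in enumerate(l):
--         if e == 1 and i < n-1:
--             if l[i+1] == 0:
--                 l[i+1] = 1
--     return l
-- ===== SOURCE B (Python) =====
-- def propagar_a_derecha(m):
--     out = []
--     i = 0
--     n = len(m)
--     while i < n:
--         if m[i] == 1:
--             j = i + 1
--             while j < n and m[j] == 0:
--                 j += 1
--             out.extend([1] * (j - i))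
--             i = j
--         else:
--             out.append(m[i])
--             i += 1
--     return out
-- ===== Notes on version B (the rewrite author's own statement) =====
-- stated objective: alternative
-- what changed: replaces A's element-wise mutate-during-enumerate cascade with a run-based algorithm: B scans for a 1, skips the whole following run of zeros in an inner loop, and emits that run as 1s while building a fresh output list
import Mathlib
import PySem

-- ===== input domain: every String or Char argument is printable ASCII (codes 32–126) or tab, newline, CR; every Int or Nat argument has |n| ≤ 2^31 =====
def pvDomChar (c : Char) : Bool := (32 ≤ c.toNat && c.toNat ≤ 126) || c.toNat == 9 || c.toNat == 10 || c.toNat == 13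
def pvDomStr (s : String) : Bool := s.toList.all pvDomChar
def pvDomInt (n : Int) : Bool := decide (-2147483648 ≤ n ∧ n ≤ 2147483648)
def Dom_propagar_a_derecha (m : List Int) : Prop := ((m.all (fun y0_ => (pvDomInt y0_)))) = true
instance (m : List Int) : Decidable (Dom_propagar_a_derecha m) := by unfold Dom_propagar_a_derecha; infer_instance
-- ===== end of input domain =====

-- B replaces A's mutate-during-enumerate cascade with a run-based scan that
-- swallows each zero-run after a 1 and emits it as 1s into a fresh list; objective: alternative.

-- ===== PORT A =====
-- one step of A's loop body: e = l[i]; if e == 1 and i < n-1: if l[i+1] == 0: l[i+1] = 1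
def pvStepA (n : Nat) (l : List Int) (i : Nat) : List Int :=
  if l.getD i 0 = 1 ∧ i < n - 1 then
    if l.getD (i + 1) 0 = 0 then l.set (i + 1) 1 else l
  else l

def propagar_a_derecha (m : List Int) : List Int :=
  (List.range m.length).foldl (pvStepA m.length) m

-- ===== PORT B =====
-- B's inner while loop: count of leading zeros of the remaining list
def pvZeros : List Int → Nat
  | [] => 0
  | x :: xs => if x = 0 then pvZeros xs + 1 else 0

-- B's outer while loop: consume one element, or a 1 together with its zero-run
def pvRunB : List Int → List Int
  | [] => []
  | x :: xs =>
    if x = 1 then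
      List.replicate (pvZeros xs + 1) 1 ++ pvRunB (xs.drop (pvZeros xs))
    else x :: pvRunB xs
termination_by l => l.length
decreasing_by
  all_goals simp

def propagar_a_derecha_alt (m : List Int) : List Int := pvRunB m

-- ===== PRECONDITION & SPEC =====
def Spec_propagar_a_derecha (m : List Int) (out : List Int) : Prop := out = propagar_a_derecha_alt m
instance (m : List Int) (out : List Int) : Decidable (Spec_propagar_a_derecha m out) := by unfold Spec_propagar_a_derecha; infer_instance

-- ===== CLAIM (what is proved, stated in full; the proofs are below) =====
def Claim_equal_propagar_a_derecha : Prop := ∀ (m : List Int), Dom_propagar_a_derecha m → Spec_propagar_a_derecha m (propagar_a_derecha m)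

-- ===== LEMMAS AND PROOFS =====

-- proof intermediary: A's cascade expressed as a single pass with a carry flag
def pvGoB (carry : Bool) : List Int → List Int
  | [] => []
  | x :: xs =>
    let x' : Int := if carry ∧ x = 0 then 1 else x
    x' :: pvGoB (x' == 1) xs

theorem pvStepA_succ (n : Nat) (x : Int) (l : List Int) (i : Nat) :
    pvStepA n (x :: l) (i + 1) = x :: pvStepA (n - 1) l i := by
  unfold pvStepA
  have hidx : i + 1 < n - 1 ↔ i < n - 1 - 1 := by omega
  simp [hidx]
  split_ifs <;> simp

theorem foldl_stepA_shift (idxs : List Nat) (n : Nat) (x : Int) (l : List Int) :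
    (idxs.map Nat.succ).foldl (pvStepA n) (x :: l) = x :: idxs.foldl (pvStepA (n - 1)) l := by
  induction idxs generalizing l with
  | nil => rfl
  | cons i t ih =>
    simp only [List.map_cons, List.foldl_cons]
    rw [show (Nat.succ i) = i + 1 from rfl, pvStepA_succ, ih]

theorem pvGoB_push (x y : Int) (r : List Int) :
    pvGoB (x == 1) (y :: r) = pvGoB false ((if x = 1 ∧ y = 0 then (1 : Int) else y) :: r) := by
  by_cases hx : x = 1 <;> by_cases hy : y = 0 <;>
    simp [pvGoB, hx, hy]

theorem main_eq : ∀ (n : Nat) (m : List Int), m.length = n →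
    (List.range n).foldl (pvStepA n) m = pvGoB false m := by
  intro n
  induction n with
  | zero => intro m hm; simp at hm; simp [hm, pvGoB]
  | succ k ih =>
    intro m hm
    match m with
    | x :: t =>
      have ht : t.length = k := by simpa using hm
      rw [List.range_succ_eq_map, List.foldl_cons]
      match t with
      | [] =>
        have hk : k = 0 := by simp at ht; omega
        subst hk
        simp [pvStepA, pvGoB]
      | y :: r =>
        have hk : 0 < k := by simp at ht; omega
        have hstep : pvStepA (k + 1) (x :: y :: r) 0 =
            x :: (if x = 1 ∧ y = 0 then (1 : Int) else y) :: r := by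
          unfold pvStepA
          by_cases hx : x = 1 <;> by_cases hy : y = 0 <;>
            simp [hx, hy, List.set] <;> omega
        rw [hstep]
        rw [foldl_stepA_shift]
        have hlen : ((if x = 1 ∧ y = 0 then (1 : Int) else y) :: r).length = k := by
          simpa using ht
        rw [show k + 1 - 1 = k from rfl, ih _ hlen]
        rw [← pvGoB_push]
        simp [pvGoB]

-- the carry-true pass fills exactly the leading zero-run with 1s
theorem pvGoB_true_eq (xs : List Int) :
    pvGoB true xs = List.replicate (pvZeros xs) 1 ++ pvGoB false (xs.drop (pvZeros xs)) := by
  induction xs with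
  | nil => simp [pvGoB, pvZeros]
  | cons x r ih =>
    by_cases hx : x = 0
    · simp [pvGoB, pvZeros, hx, List.replicate_succ, ih]
    · simp [pvGoB, pvZeros, hx]

theorem goB_eq_runB : ∀ (n : Nat) (m : List Int), m.length ≤ n → pvGoB false m = pvRunB m := by
  intro n
  induction n with
  | zero => intro m hm; simp at hm; simp [hm, pvGoB, pvRunB.eq_def]
  | succ k ih =>
    intro m hm
    match m with
    | [] => simp [pvGoB, pvRunB.eq_def]
    | x :: xs =>
      by_cases hx : x = 1
      · have hd : (xs.drop (pvZeros xs)).length ≤ k := by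
          simp at hm ⊢; omega
        have h1 : pvGoB false (x :: xs) = 1 :: pvGoB true xs := by
          subst hx; simp [pvGoB]
        rw [h1, pvGoB_true_eq, ih _ hd]
        conv_rhs => rw [pvRunB.eq_def]
        simp [hx, List.replicate_succ]
      · have hxs : xs.length ≤ k := by simp at hm; omega
        have hb : (x == 1) = false := by simp [hx]
        rw [pvGoB]
        conv_rhs => rw [pvRunB.eq_def]
        simp [hx, hb, ih _ hxs]

-- ===== VERDICT (by name: the statement is the Claim_ definition above) =====
theorem propagar_a_derecha_spec : Claim_equal_propagar_a_derecha := by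
  intro m _
  unfold Spec_propagar_a_derecha propagar_a_derecha propagar_a_derecha_alt
  rw [main_eq m.length m rfl, goB_eq_runB m.length m le_rfl]
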